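-- pv_equiv track=rewrite | github.com/djedra/Test_development | TESTS/task1/unique_names/main.py | unique_names
-- ===== SOURCE A (Python) =====
-- def unique_names(mentors: list) -> str:
--     all_list = []
--     for m in mentors:
--         all_list.extend(m)
--
--     all_names_list = []
--     for mentor in all_list:
--         name = mentor.split(" ")[0]
--         all_names_list.append(name)
--
--     unique_names = set(all_names_list)
--     all_names_sorted = sorted(unique_names)
--     return f'Уникальные имена преподавателей: {", ".join(all_names_sorted)}'
-- ===== SOURCE B (Python) =====
-- def _ins(acc, name):
--     """Insert name into sorted duplicate-free list acc, keeping it sorted and duplicate-free."""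
--     if not acc:
--         return [name]
--     if name < acc[0]:
--         return [name] + acc
--     if name == acc[0]:
--         return acc
--     return [acc[0]] + _ins(acc[1:], name)
--
--
-- def unique_names(mentors: list) -> str:
--     acc = []
--     for row in mentors:
--         for m in row:
--             acc = _ins(acc, m.split(" ")[0])
--     return f'Уникальные имена преподавателей: {", ".join(acc)}'
-- ===== Notes on version B (the rewrite author's own statement) =====
-- stated objective: alternative
-- what changed: Eliminates both the hash set and the sorted() call: a single pass over the mentors maintains a sorted duplicate-free accumulator by ordered insertion (recursive insert into the sorted prefix), so deduplication and ordering happen incrementally instead of as staged set-build and sort passes.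
import Mathlib
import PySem

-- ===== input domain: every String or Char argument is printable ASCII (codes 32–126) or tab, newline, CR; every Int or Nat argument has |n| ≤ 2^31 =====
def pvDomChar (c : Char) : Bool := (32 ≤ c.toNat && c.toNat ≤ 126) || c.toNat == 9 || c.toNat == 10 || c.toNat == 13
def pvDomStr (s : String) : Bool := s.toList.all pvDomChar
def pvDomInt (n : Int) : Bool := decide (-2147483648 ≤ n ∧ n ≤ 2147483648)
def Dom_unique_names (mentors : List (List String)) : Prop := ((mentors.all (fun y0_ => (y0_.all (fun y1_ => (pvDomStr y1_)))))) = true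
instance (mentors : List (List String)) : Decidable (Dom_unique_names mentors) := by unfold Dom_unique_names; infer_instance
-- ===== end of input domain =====

-- B drops both the hash set and the sorted() call: one pass inserts each first name
-- into a sorted duplicate-free accumulator (ordered insertion) — alternative algorithm, similar cost.

-- ===== PORT A =====
def unique_names (mentors : List (List String)) : String :=
  let all_list := mentors.foldl (fun acc m => acc ++ m) []
  let all_names_list :=
    all_list.foldl
      (fun acc mentor => acc ++ [PySem.List.pyGetD ((PySem.Str.split? mentor " ").getD []) 0 ""]) []
  let uniq : PySem.Set String := PySem.Set.ofList all_names_list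
  let all_names_sorted := PySem.List.sorted uniq (fun x => x) false
  "Уникальные имена преподавателей: " ++ PySem.Str.join ", " all_names_sorted

-- ===== PORT B =====
-- _ins: insert into a sorted duplicate-free list (recursive, as in Source B)
def pvIns : List String → String → List String
  | [], name => [name]
  | a :: t, name =>
    if name < a then name :: a :: t
    else if name == a then a :: t
    else a :: pvIns t name

def unique_names_alt (mentors : List (List String)) : String :=
  let acc := mentors.foldl
    (fun acc row =>
      row.foldl
        (fun acc m => pvIns acc (PySem.List.pyGetD ((PySem.Str.split? m " ").getD []) 0 "")) acc)
    []
  "Уникальные имена преподавателей: " ++ PySem.Str.join ", " acc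

-- ===== PRECONDITION & SPEC =====
def Spec_unique_names (mentors : List (List String)) (out : String) : Prop := out = unique_names_alt mentors
instance (mentors : List (List String)) (out : String) : Decidable (Spec_unique_names mentors out) := by unfold Spec_unique_names; infer_instance

-- ===== CLAIM =====
def Claim_equal_unique_names : Prop := ∀ (mentors : List (List String)), Dom_unique_names mentors → Spec_unique_names mentors (unique_names mentors)

-- ===== LEMMAS AND PROOFS =====

theorem pvIns_mem (acc : List String) (name y : String) :
    y ∈ pvIns acc name ↔ y = name ∨ y ∈ acc := by
  induction acc with
  | nil => simp [pvIns]
  | cons a t ih =>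
    rw [pvIns]
    by_cases h1 : name < a
    · simp [h1]
    · rw [if_neg h1]
      by_cases h2 : name = a
      · simp [h2]
      · rw [if_neg (by simpa using h2)]
        simp [ih]; tauto

theorem pvIns_pairwise (acc : List String) (name : String)
    (h : acc.Pairwise (· < ·)) : (pvIns acc name).Pairwise (· < ·) := by
  induction acc with
  | nil => simp [pvIns]
  | cons a t ih =>
    have ha : ∀ z ∈ t, a < z := (List.pairwise_cons.mp h).1
    have ht : t.Pairwise (· < ·) := (List.pairwise_cons.mp h).2
    rw [pvIns]
    by_cases h1 : name < a
    · rw [if_pos h1]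
      refine List.pairwise_cons.mpr ⟨?_, h⟩
      intro z hz
      rcases List.mem_cons.mp hz with rfl | hz
      · exact h1
      · exact h1.trans (ha z hz)
    · rw [if_neg h1]
      by_cases h2 : name = a
      · rw [if_pos (by simpa using h2)]; exact h
      · rw [if_neg (by simpa using h2)]
        refine List.pairwise_cons.mpr ⟨?_, ih ht⟩
        intro z hz
        rcases (pvIns_mem t name z).mp hz with rfl | hz
        · exact lt_of_le_of_ne (not_lt.mp h1) (Ne.symm h2)
        · exact ha z hz

-- B's inner fold over a flat list of strings, through the name-extractor g
theorem pvFoldl_ins (g : String → String) (l : List String) (acc : List String)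
    (h : acc.Pairwise (· < ·)) :
    (l.foldl (fun acc m => pvIns acc (g m)) acc).Pairwise (· < ·) ∧
      (∀ y, y ∈ l.foldl (fun acc m => pvIns acc (g m)) acc ↔ y ∈ acc ∨ y ∈ l.map g) := by
  induction l generalizing acc with
  | nil => simpa using h
  | cons a t ih =>
    rw [List.foldl_cons]
    obtain ⟨hp, hm⟩ := ih (pvIns acc (g a)) (pvIns_pairwise acc (g a) h)
    refine ⟨hp, fun y => ?_⟩
    rw [hm y, pvIns_mem]
    simp; tauto

-- B's nested row loop equals the fold over the flattened list
theorem pvFoldl_nested (g : String → String) (L : List (List String)) (acc : List String) :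
    L.foldl (fun acc row => row.foldl (fun acc m => pvIns acc (g m)) acc) acc
      = (L.flatten).foldl (fun acc m => pvIns acc (g m)) acc := by
  induction L generalizing acc with
  | nil => simp
  | cons r t ih => simp [ih, List.foldl_append]

-- A's first flatten loop
theorem pvFoldl_flatten (L : List (List String)) (acc : List String) :
    L.foldl (fun a m => a ++ m) acc = acc ++ L.flatten := by
  induction L generalizing acc with
  | nil => simp
  | cons h t ih => simp [ih]

-- A's second loop is a map
theorem pvFoldl_map (l : List String) (acc : List String) :
    l.foldl
      (fun a mentor => a ++ [PySem.List.pyGetD ((PySem.Str.split? mentor " ").getD []) 0 ""]) acc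
      = acc ++ l.map (fun m => PySem.List.pyGetD ((PySem.Str.split? m " ").getD []) 0 "") := by
  induction l generalizing acc with
  | nil => simp
  | cons h t ih => simp [ih]

-- ===== VERDICT =====
theorem unique_names_spec : Claim_equal_unique_names := by
  intro mentors _
  unfold Spec_unique_names unique_names unique_names_alt
  set g : String → String :=
    fun m => PySem.List.pyGetD ((PySem.Str.split? m " ").getD []) 0 "" with hg
  rw [pvFoldl_nested g]
  set ns : List String := (mentors.flatten).map g with hnsdef
  set s : List String := (mentors.flatten).foldl (fun acc m => pvIns acc (g m)) [] with hsdef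
  obtain ⟨hp, hm⟩ := pvFoldl_ins g mentors.flatten [] (by simp)
  have hnodup : s.Nodup := hp.imp (fun h => ne_of_lt h)
  have hperm : s.Perm (PySem.Set.ofList ns) := by
    refine (List.perm_ext_iff_of_nodup hnodup (PySem.Set.nodup_ofList ns)).mpr ?_
    intro y
    rw [PySem.Set.mem_ofList, hnsdef]
    simpa using hm y
  have hkey : PySem.List.sorted (PySem.Set.ofList ns) (fun x => x) false = s :=
    PySem.List.sorted_eq_of_perm_of_pairwise_lt (PySem.Set.ofList ns) s
      (fun x => x) hperm hp
  simp only [pvFoldl_flatten, pvFoldl_map, List.nil_append, ← hg, ← hnsdef, hkey]
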